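-- pv_equiv track=rewrite | github.com/kbturk/AOC2021 | Day3.py | make_a_list
-- ===== SOURCE A (Python) =====
-- from typing import List, Tuple
-- from copy import deepcopy
--
-- def most_least(subList: List[str], i: int) -> Tuple[str,str]:
--     tot = [0,0]
--     for item in subList:
--         if item[i] == '0':
--             tot[0] += 1
--         else:
--             tot[1] += 1
--     if tot[0] == tot[1]:
--         return ('1','0')
--     elif tot[0] > tot[1]:
--         return ('0','1')
--     else:
--         return ('1','0')
--
-- def make_a_list(raw:List[str], d:int=0) -> List[str]:
--     subList = deepcopy(raw)
--     sListTemp=[]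
--
--     for i in range(len(subList[0])):
--         digit = most_least(subList,i)
--         for item in subList:
--             if digit[d] == item[i]:
--                 sListTemp.append(item)
--         if len(sListTemp) == 1:
--             return sListTemp
--         subList = deepcopy(sListTemp)
--         sListTemp = []
--     raise NameError(f"no single solution found: {subList}")
--     return subList
-- ===== SOURCE B (Python) =====
-- def make_a_list(raw, d=0):
--     def go(cands, i):
--         if i >= len(raw[0]):
--             raise NameError(f"no single solution found: {cands}")
--         zeros = sum(1 for s in cands if s[i] == '0')
--         ones = len(cands) - zeros
--         digit = ('0', '1') if zeros > ones else ('1', '0')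
--         keep = digit[d]
--         nxt = [s for s in cands if s[i] == keep]
--         if len(nxt) == 1:
--             return nxt
--         return go(nxt, i + 1)
--     return go(list(raw), 0)
-- ===== Notes on version B (the rewrite author's own statement) =====
-- stated objective: alternative
-- what changed: The column loop with a mutable temp list, deepcopy round-trips and a separate two-bucket tally helper is replaced by a single recursive filter: each call counts '0's at the current column once, derives the keep-bit, filters with a comprehension and recurses on the shrunken candidate list; B raises the same IndexError/NameError as A, and Pre_ admits exactly the inputs on which A returns normally.
import Mathlib
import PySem

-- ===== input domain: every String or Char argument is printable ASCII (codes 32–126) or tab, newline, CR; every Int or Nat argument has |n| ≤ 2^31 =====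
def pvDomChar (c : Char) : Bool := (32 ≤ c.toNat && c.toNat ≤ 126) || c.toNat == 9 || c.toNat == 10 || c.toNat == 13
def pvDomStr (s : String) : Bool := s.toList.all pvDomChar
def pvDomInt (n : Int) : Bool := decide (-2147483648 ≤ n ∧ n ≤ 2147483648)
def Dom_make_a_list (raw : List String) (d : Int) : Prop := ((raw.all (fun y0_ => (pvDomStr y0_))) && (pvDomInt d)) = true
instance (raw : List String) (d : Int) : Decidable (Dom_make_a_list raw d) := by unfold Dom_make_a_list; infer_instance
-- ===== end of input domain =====

-- B replaces A's column loop + mutable temp list + deepcopy round-trips + separate two-bucket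
-- tally helper by one recursive filter over the candidate list (objective: alternative
-- decomposition, same cost); B raises the same exceptions as A where A raises.


-- ===== PORT A =====
-- most_least: tallies '0' vs non-'0' at column i.  Python raises IndexError when i is out of
-- range for some item; that case is outside Pre_ (here the out-of-range item is tallied as non-'0').
def pvML_most_least (subList : List String) (i : Int) : Char × Char :=
  let tot := subList.foldl
    (fun (t : Int × Int) item =>
      if PySem.Str.pyGet? item i = some '0' then (t.1 + 1, t.2) else (t.1, t.2 + 1))
    (0, 0)
  if tot.1 = tot.2 then ('1', '0')
  else if tot.1 > tot.2 then ('0', '1')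
  else ('1', '0')

-- the 'for i in range(...)' loop with its early return; [] at exhaustion = Python's NameError (outside Pre_)
def pvML_loopA (d : Int) : List Int → List String → List String
  | [], _subList => []  -- Python: raise NameError (outside Pre_)
  | i :: rest, subList =>
    let digit := pvML_most_least subList i
    let keep := PySem.List.pyGet? [digit.1, digit.2] d  -- digit[d]; none = IndexError (outside Pre_)
    let sListTemp := subList.foldl
      (fun acc item => if keep = PySem.Str.pyGet? item i then acc ++ [item] else acc) []
    if sListTemp.length = 1 then sListTemp
    else pvML_loopA d rest sListTemp

def make_a_list (raw : List String) (d : Int) : List String :=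
  match raw with
  | [] => []  -- Python: IndexError on subList[0] (outside Pre_)
  | s0 :: _ => pvML_loopA d (PySem.List.pyRange 0 (s0.length : Int) 1) raw

-- ===== PORT B =====
-- recursive helper go(cands, i); [] where Source B raises NameError / IndexError (outside Pre_)
def pvML_go (raw : List String) (d : Int) (cands : List String) (i : Nat) : List String :=
  if _h : raw.headI.length ≤ i then []  -- Python: raise NameError (outside Pre_)
  else
    let zeros := (cands.filter (fun s => PySem.Str.pyGet? s (i : Int) = some '0')).length
    let ones := cands.length - zeros
    let digit : Char × Char := if zeros > ones then ('0', '1') else ('1', '0')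
    let keep := PySem.List.pyGet? [digit.1, digit.2] d  -- digit[d]; none = IndexError (outside Pre_)
    let nxt := cands.filter (fun s => PySem.Str.pyGet? s (i : Int) = keep)
    if nxt.length = 1 then nxt
    else pvML_go raw d nxt (i + 1)
  termination_by raw.headI.length - i

def make_a_list_alt (raw : List String) (d : Int) : List String :=
  pvML_go raw d raw 0

-- ===== PRECONDITION & SPEC =====
-- Pre_ holds on EXACTLY the inputs where the Python A returns normally.  A raises IndexError
-- (empty raw, a column index past some candidate string, d outside -2..1) or NameError (the
-- column filter runs out of columns without isolating a single string); which of these happens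
-- is a property of the run of the filter, not of the shape of the input, so the precondition
-- necessarily replays the column selection — as an independent count-only checker (it builds no
-- output and is shared by neither port).
def pvML_ok (d : Int) : Nat → Nat → List String → Bool
  | 0, _, _ => false                  -- columns exhausted: Python raises NameError
  | k+1, i, cands =>
    if cands.isEmpty then false       -- an empty candidate list can never reach a singleton
    else if cands.any (fun s => decide (s.toList.length ≤ i)) then false  -- item[i]: IndexError
    else if !(d == 0 || d == -2 || d == 1 || d == -1) then false          -- digit[d]: IndexError
    else
      let zeros := (cands.filter (fun s => s.toList.getD i ' ' == '0')).length
      let keep : Char :=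
        if d == 0 || d == -2 then (if zeros > cands.length - zeros then '0' else '1')
        else (if zeros > cands.length - zeros then '1' else '0')
      let nxt := cands.filter (fun s => s.toList.getD i ' ' == keep)
      if nxt.length == 1 then true else pvML_ok d k (i+1) nxt

def Pre_make_a_list (raw : List String) (d : Int) : Prop :=
  pvML_ok d raw.headI.toList.length 0 raw = true

instance (raw : List String) (d : Int) : Decidable (Pre_make_a_list raw d) := by
  unfold Pre_make_a_list; infer_instance

def pvWitness_make_a_list : List String × Int := (["00", "01", "10", "11"], 0)

def Spec_make_a_list (raw : List String) (d : Int) (out : List String) : Prop := out = make_a_list_alt raw d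
instance (raw : List String) (d : Int) (out : List String) : Decidable (Spec_make_a_list raw d out) := by unfold Spec_make_a_list; infer_instance

-- ===== CLAIM (what is proved, stated in full; the proofs are below) =====
def Claim_equal_make_a_list : Prop := ∀ (raw : List String) (d : Int), Dom_make_a_list raw d → Pre_make_a_list raw d → Spec_make_a_list raw d (make_a_list raw d)

-- ===== LEMMAS AND PROOFS =====

-- A's tally fold, closed form: (# of '0's, # of the rest) added to the accumulator.
theorem pvML_tot_eq (i : Int) (xs : List String) : ∀ (a b : Int),
    xs.foldl
      (fun (t : Int × Int) item =>
        if PySem.Str.pyGet? item i = some '0' then (t.1 + 1, t.2) else (t.1, t.2 + 1))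
      (a, b)
    = (a + ((xs.filter (fun s => PySem.Str.pyGet? s i = some '0')).length : Int),
       b + ((xs.length : Int) - ((xs.filter (fun s => PySem.Str.pyGet? s i = some '0')).length : Int))) := by
  induction xs with
  | nil => intro a b; simp
  | cons x xs ih =>
    intro a b
    simp only [List.foldl_cons]
    by_cases hx : PySem.Str.pyGet? x i = some '0'
    · rw [if_pos hx, List.filter_cons_of_pos (by simpa using hx), ih]
      rw [Prod.ext_iff]
      constructor <;> simp <;> omega
    · rw [if_neg hx, List.filter_cons_of_neg (by simpa using hx), ih]
      rw [Prod.ext_iff]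
      constructor <;> simp <;> omega

-- A's most_least equals B's count-and-compare derivation of the digit pair.
theorem pvML_digit_eq (i : Int) (xs : List String) :
    pvML_most_least xs i
    = (if (xs.filter (fun s => PySem.Str.pyGet? s i = some '0')).length
          > xs.length - (xs.filter (fun s => PySem.Str.pyGet? s i = some '0')).length
       then ('0', '1') else ('1', '0')) := by
  have hle : (xs.filter (fun s => PySem.Str.pyGet? s i = some '0')).length ≤ xs.length :=
    List.length_filter_le _ _
  unfold pvML_most_least
  rw [pvML_tot_eq]
  set Z := (xs.filter (fun s => PySem.Str.pyGet? s i = some '0')).length with hZ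
  by_cases h1 : (0 + (Z : Int)) = (0 + ((xs.length : Int) - (Z : Int)))
  · rw [if_pos h1, if_neg (by omega)]
  · rw [if_neg h1]
    by_cases h2 : (0 + (Z : Int)) > (0 + ((xs.length : Int) - (Z : Int)))
    · rw [if_pos h2, if_pos (by omega)]
    · rw [if_neg h2, if_neg (by omega)]

-- A's append-fold filter equals B's comprehension filter (same keep character).
theorem pvML_filter_eq (keep : Option Char) (f : String → Option Char) (xs : List String) :
    xs.foldl (fun acc item => if keep = f item then acc ++ [item] else acc) []
    = xs.filter (fun s => f s = keep) := by
  rw [PySem.List.foldl_append_ite_eq_filter]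
  simp only [List.nil_append]
  exact List.filter_congr (fun x _ => by simp [eq_comm])

-- the loop of A over the remaining columns equals B's recursion, for any candidate list.
theorem pvML_loop_eq (raw : List String) (d : Int) :
    ∀ (k i : Nat), i + k = raw.headI.length → ∀ (cands : List String),
      pvML_loopA d ((List.range' i k).map (fun n : Nat => (n : Int))) cands = pvML_go raw d cands i := by
  intro k
  induction k with
  | zero =>
    intro i hi cands
    rw [pvML_go, dif_pos (by omega : raw.headI.length ≤ i)]
    simp [pvML_loopA]
  | succ k ih =>
    intro i hi cands
    rw [pvML_go, dif_neg (by omega : ¬ raw.headI.length ≤ i)]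
    rw [List.range'_succ]
    simp only [List.map_cons, pvML_loopA]
    simp [pvML_digit_eq, pvML_filter_eq, ih (i + 1) (by omega : (i+1) + k = raw.headI.length)]

theorem pvML_main (raw : List String) (d : Int) :
    make_a_list raw d = make_a_list_alt raw d := by
  cases raw with
  | nil =>
    rw [make_a_list_alt, pvML_go, dif_pos (by simp : (List.headI ([] : List String)).length ≤ 0)]
    rfl
  | cons s0 rest =>
    have hr : PySem.List.pyRange 0 ((s0.length : Int)) 1
        = (List.range' 0 s0.length).map (fun n : Nat => (n : Int)) := by
      rw [PySem.List.pyRange_one, ← List.range_eq_range']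
      simp
    rw [make_a_list, make_a_list_alt, hr]
    exact pvML_loop_eq (s0 :: rest) d s0.length 0 (by simp) (s0 :: rest)

-- ===== VERDICT (by name: the statement is the Claim_ definition above) =====
theorem make_a_list_spec : Claim_equal_make_a_list := by
  intro raw d _dom _pre
  unfold Spec_make_a_list
  exact pvML_main raw d
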